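-- pv_equiv track=rewrite | github.com/litterzhang/chatbox | WordSegment/segs/bmseg.py | mmseg
-- ===== SOURCE A (Python) =====
-- def mmseg(sen_str, dict_load=None, word_max=5):
-- 	# 词袋
-- 	words = list()
--
-- 	# 处理每个字据
-- 	while sen_str:
-- 		cut_tmp = sen_str[:word_max]
-- 		cut_tmp_len = len(cut_tmp)
--
-- 		while cut_tmp:
-- 			if cut_tmp in dict_load:
-- 				# 加入word
-- 				words.append((cut_tmp, dict_load[cut_tmp][0], dict_load[cut_tmp][1]))
-- 				sen_str = sen_str[cut_tmp_len:]
-- 				break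
--
-- 			if cut_tmp_len==1:
-- 				words.append((cut_tmp, 0, 'wz'))
-- 				sen_str = sen_str[cut_tmp_len:]
-- 				break
--
-- 			cut_tmp = cut_tmp[:-1]
-- 			cut_tmp_len -= 1
-- 	return words
-- ===== SOURCE B (Python) =====
-- def mmseg(sen_str, dict_load=None, word_max=5):
--     # Index-pointer scan: at each position find the longest dictionary word
--     # (length <= word_max) matching there by one pass over the dictionary,
--     # instead of hashing shrinking prefix slices.
--     words = []
--     i, n = 0, len(sen_str)
--     while i < n:
--         best = 0
--         for w in dict_load:
--             L = len(w)
--             if best < L and L <= word_max and sen_str.startswith(w, i):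
--                 best = L
--         if best:
--             w = sen_str[i:i + best]
--             x, y = dict_load[w]
--             words.append((w, x, y))
--             i += best
--         else:
--             words.append((sen_str[i], 0, 'wz'))
--             i += 1
--     return words
-- ===== Notes on version B (the rewrite author's own statement) =====
-- stated objective: alternative
-- what changed: A repeatedly slices a shrinking prefix and tests each slice for dict membership; B keeps an index pointer and finds the longest match at each position by a single pass over the dictionary entries with startswith, then advances by that length.
import Mathlib
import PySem

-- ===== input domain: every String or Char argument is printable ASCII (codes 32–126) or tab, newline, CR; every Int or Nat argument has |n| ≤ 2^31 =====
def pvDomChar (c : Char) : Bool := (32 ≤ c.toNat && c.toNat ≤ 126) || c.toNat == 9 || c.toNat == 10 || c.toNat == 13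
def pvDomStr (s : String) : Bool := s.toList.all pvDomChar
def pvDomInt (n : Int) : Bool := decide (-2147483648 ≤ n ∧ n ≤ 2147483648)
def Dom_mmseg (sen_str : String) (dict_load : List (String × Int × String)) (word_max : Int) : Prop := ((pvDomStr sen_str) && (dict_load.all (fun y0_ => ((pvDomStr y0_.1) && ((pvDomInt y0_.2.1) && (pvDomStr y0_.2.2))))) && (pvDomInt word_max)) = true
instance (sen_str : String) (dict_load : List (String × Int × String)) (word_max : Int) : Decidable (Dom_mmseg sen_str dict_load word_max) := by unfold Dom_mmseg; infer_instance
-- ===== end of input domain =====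

-- B replaces A's shrinking-prefix dict-membership search by an index-pointer scan that finds the
-- longest match at each position with one pass over the dictionary entries (objective: alternative).


-- ===== PORT A =====
-- inner 'while cut_tmp' loop: returns the appended token together with cut_tmp_len (the advance)
def mmsegInner (d : PySem.Dict String (Int × String)) : List Char → Option ((String × Int × String) × Nat)
  | [] => none
  | c :: cs =>
    match PySem.Dict.get? d (String.ofList (c :: cs)) with
    | some (x, y) => some ((String.ofList (c :: cs), x, y), (c :: cs).length)
    | none =>
      if (c :: cs).length = 1 then some ((String.ofList (c :: cs), 0, "wz"), 1)
      else mmsegInner d (c :: cs).dropLast          -- cut_tmp = cut_tmp[:-1]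
termination_by cs => cs.length
decreasing_by simp

-- outer 'while sen_str' loop; fuel = sen_str length (each step consumes ≥ 1 char under Pre_;
-- the 'none' branch is where the Python loops forever — excluded by Pre_)
def mmsegLoop (d : PySem.Dict String (Int × String)) (word_max : Int) : Nat → List Char → List (String × Int × String)
  | 0, _ => []
  | _, [] => []
  | fuel + 1, c :: cs =>
    match mmsegInner d (PySem.List.slice (c :: cs) none (some word_max)) with   -- sen_str[:word_max]
    | some (tok, k) => tok :: mmsegLoop d word_max fuel ((c :: cs).drop k)      -- sen_str[cut_tmp_len:], k ≥ 0
    | none => []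

def mmseg (sen_str : String) (dict_load : List (String × Int × String)) (word_max : Int) : List (String × Int × String) :=
  mmsegLoop (PySem.Dict.mk dict_load) word_max sen_str.toList.length sen_str.toList

-- ===== PORT B =====
-- one pass over the dictionary entries: longest w with len(w) ≤ word_max matching at the pointer
def bestLen (dict_load : List (String × Int × String)) (cs : List Char) (word_max : Int) : Nat :=
  dict_load.foldl (fun best t =>
    let L := t.1.toList.length
    if best < L ∧ (L : Int) ≤ word_max ∧ PySem.Chars.startswith cs t.1.toList then L else best) 0

def mmsegAltLoop (dict_load : List (String × Int × String)) (word_max : Int) : Nat → List Char → List (String × Int × String)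
  | 0, _ => []
  | _, [] => []
  | fuel + 1, c :: cs =>
    let b := bestLen dict_load (c :: cs) word_max
    if b = 0 then (String.ofList [c], 0, "wz") :: mmsegAltLoop dict_load word_max fuel cs
    else
      let w := String.ofList ((c :: cs).take b)                                   -- sen_str[i:i+best]
      match PySem.Dict.get? (PySem.Dict.mk dict_load) w with                  -- x, y = dict_load[w]
      | some (x, y) => (w, x, y) :: mmsegAltLoop dict_load word_max fuel ((c :: cs).drop b)
      | none => []   -- unreachable: the matched word is a dictionary key

def mmseg_alt (sen_str : String) (dict_load : List (String × Int × String)) (word_max : Int) : List (String × Int × String) :=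
  mmsegAltLoop dict_load word_max sen_str.toList.length sen_str.toList

-- ===== PRECONDITION & SPEC =====
-- Pre_ excludes word_max ≤ 0 with a nonempty sen_str: there A's outer loop never shrinks sen_str
-- below |word_max| characters, cut_tmp becomes empty and the Python loops forever (no value is returned).
def Pre_mmseg (sen_str : String) (dict_load : List (String × Int × String)) (word_max : Int) : Prop :=
  1 ≤ word_max ∨ sen_str = ""
instance (sen_str : String) (dict_load : List (String × Int × String)) (word_max : Int) : Decidable (Pre_mmseg sen_str dict_load word_max) := by unfold Pre_mmseg; infer_instance

def pvWitness_mmseg : String × (List (String × Int × String)) × Int := ("abcab", [("ab", 3, "n"), ("bca", 7, "v")], 3)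

def Spec_mmseg (sen_str : String) (dict_load : List (String × Int × String)) (word_max : Int) (out : List (String × Int × String)) : Prop := out = mmseg_alt sen_str dict_load word_max
instance (sen_str : String) (dict_load : List (String × Int × String)) (word_max : Int) (out : List (String × Int × String)) : Decidable (Spec_mmseg sen_str dict_load word_max out) := by unfold Spec_mmseg; infer_instance

-- ===== CLAIM (what is proved, stated in full; the proofs are below) =====
def Claim_equal_mmseg : Prop := ∀ (sen_str : String) (dict_load : List (String × Int × String)) (word_max : Int), Dom_mmseg sen_str dict_load word_max → Pre_mmseg sen_str dict_load word_max → Spec_mmseg sen_str dict_load word_max (mmseg sen_str dict_load word_max)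

-- ===== LEMMAS AND PROOFS =====

-- 'there is a dictionary word of length L matching at the front of cs'
def HitAt (dict_load : List (String × Int × String)) (cs : List Char) (L : Nat) : Prop :=
  ∃ t ∈ dict_load, t.1.toList.length = L ∧ t.1.toList <+: cs

-- greatest L ≤ m that hits (0 if none): the common characterisation of both searches
def maxHit (d : PySem.Dict String (Int × String)) (cs : List Char) : Nat → Nat
  | 0 => 0
  | m + 1 => if (PySem.Dict.get? d (String.ofList (cs.take (m + 1)))).isSome then m + 1 else maxHit d cs m

theorem get?_mk_isSome_iff (dict_load : List (String × Int × String)) (s : String) :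
    (PySem.Dict.get? (PySem.Dict.mk dict_load) s).isSome ↔ ∃ t ∈ dict_load, t.1 = s := by
  induction dict_load with
  | nil => simp [PySem.Dict.get?]
  | cons t rest ih =>
    obtain ⟨k, v⟩ := t
    rw [PySem.Dict.get?_mk_cons]
    by_cases h : k = s
    · subst h; simp
    · simp only [beq_iff_eq, h, if_false, ih, List.mem_cons]
      constructor
      · rintro ⟨u, hu, he⟩; exact ⟨u, Or.inr hu, he⟩
      · rintro ⟨u, hu | hu, he⟩
        · subst hu; simp at he; exact absurd he h
        · exact ⟨u, hu, he⟩

theorem hit_iff (dict_load : List (String × Int × String)) (cs : List Char) (L : Nat)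
    (h1 : 1 ≤ L) (h2 : L ≤ cs.length) :
    (PySem.Dict.get? (PySem.Dict.mk dict_load) (String.ofList (cs.take L))).isSome ↔ HitAt dict_load cs L := by
  rw [get?_mk_isSome_iff]
  unfold HitAt
  constructor
  · rintro ⟨t, ht, he⟩
    refine ⟨t, ht, ?_, ?_⟩
    · rw [he]; simp [List.length_take]; omega
    · rw [he]; simp [List.take_prefix]
  · rintro ⟨t, ht, hlen, hpre⟩
    refine ⟨t, ht, ?_⟩
    have : t.1.toList = cs.take L := by
      rw [List.prefix_iff_eq_take] at hpre; rw [hpre, hlen]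
    rw [← this, String.ofList_toList]

theorem maxHit_le (d : PySem.Dict String (Int × String)) (cs : List Char) (m : Nat) :
    maxHit d cs m ≤ m := by
  induction m with
  | zero => simp [maxHit]
  | succ m ih => rw [maxHit]; split <;> omega

theorem maxHit_spec (d : PySem.Dict String (Int × String)) (cs : List Char) (m : Nat) :
    (maxHit d cs m = 0 ∨ ((PySem.Dict.get? d (String.ofList (cs.take (maxHit d cs m)))).isSome ∧ 1 ≤ maxHit d cs m))
    ∧ (∀ (L : Nat), 1 ≤ L → L ≤ m → (PySem.Dict.get? d (String.ofList (cs.take L))).isSome → L ≤ maxHit d cs m) := by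
  induction m with
  | zero => exact ⟨Or.inl rfl, fun L h1 h2 _ => by omega⟩
  | succ m ih =>
    rw [maxHit]
    split
    · next hs => exact ⟨Or.inr ⟨hs, by omega⟩, fun L _ h2 _ => h2⟩
    · next hs =>
      refine ⟨ih.1, fun L h1 h2 hL => ?_⟩
      rcases Nat.lt_or_ge L (m + 1) with h | h
      · exact ih.2 L h1 (by omega) hL
      · have hLe : L = m + 1 := by omega
        subst hLe; exact absurd hL hs

theorem hitAt_cons (t : String × Int × String) (rest : List (String × Int × String)) (cs : List Char) (L : Nat)
    (h : HitAt rest cs L) : HitAt (t :: rest) cs L := by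
  obtain ⟨u, hu, h1, h2⟩ := h; exact ⟨u, List.mem_cons_of_mem _ hu, h1, h2⟩

theorem foldl_best_spec (cs : List Char) (wm : Int) (l : List (String × Int × String)) :
    ∀ (acc : Nat),
      acc ≤ l.foldl (fun best t => if best < t.1.toList.length ∧ ((t.1.toList.length : Int)) ≤ wm ∧ PySem.Chars.startswith cs t.1.toList then t.1.toList.length else best) acc
      ∧ (l.foldl (fun best t => if best < t.1.toList.length ∧ ((t.1.toList.length : Int)) ≤ wm ∧ PySem.Chars.startswith cs t.1.toList then t.1.toList.length else best) acc = acc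
         ∨ (HitAt l cs (l.foldl (fun best t => if best < t.1.toList.length ∧ ((t.1.toList.length : Int)) ≤ wm ∧ PySem.Chars.startswith cs t.1.toList then t.1.toList.length else best) acc)
            ∧ acc < l.foldl (fun best t => if best < t.1.toList.length ∧ ((t.1.toList.length : Int)) ≤ wm ∧ PySem.Chars.startswith cs t.1.toList then t.1.toList.length else best) acc
            ∧ Int.ofNat (l.foldl (fun best t => if best < t.1.toList.length ∧ ((t.1.toList.length : Int)) ≤ wm ∧ PySem.Chars.startswith cs t.1.toList then t.1.toList.length else best) acc) ≤ wm))
      ∧ ∀ (L : Nat), acc < L → (L : Int) ≤ wm → HitAt l cs L →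
          L ≤ l.foldl (fun best t => if best < t.1.toList.length ∧ ((t.1.toList.length : Int)) ≤ wm ∧ PySem.Chars.startswith cs t.1.toList then t.1.toList.length else best) acc := by
  induction l with
  | nil =>
    intro acc
    refine ⟨le_refl _, Or.inl rfl, ?_⟩
    rintro L _ _ ⟨t, ht, _⟩; cases ht
  | cons t rest ih =>
    intro acc
    simp only [List.foldl_cons]
    obtain ⟨hle, hcase, hmax⟩ := ih (if acc < t.1.toList.length ∧ ((t.1.toList.length : Int)) ≤ wm ∧ PySem.Chars.startswith cs t.1.toList then t.1.toList.length else acc)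
    have haccle : acc ≤ (if acc < t.1.toList.length ∧ ((t.1.toList.length : Int)) ≤ wm ∧ PySem.Chars.startswith cs t.1.toList then t.1.toList.length else acc) := by
      split
      · next hc => omega
      · exact le_refl _
    refine ⟨le_trans haccle hle, ?_, ?_⟩
    · rcases hcase with h | ⟨hh, hlt, hw⟩
      · rw [h]
        split
        · next hc =>
          exact Or.inr ⟨⟨t, List.mem_cons_self, rfl, (PySem.Chars.startswith_iff cs t.1.toList).1 hc.2.2⟩, hc.1, by exact_mod_cast hc.2.1⟩
        · exact Or.inl rfl
      · exact Or.inr ⟨hitAt_cons t rest cs _ hh, by omega, hw⟩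
    · rintro L h1 h2 ⟨u, hu, hlen, hpre⟩
      rcases List.mem_cons.1 hu with rfl | hu'
      · -- the head entry itself achieves L: the accumulator becomes L right away
        have hc : acc < u.1.toList.length ∧ ((u.1.toList.length : Int)) ≤ wm ∧ PySem.Chars.startswith cs u.1.toList := by
          refine ⟨by omega, by rw [hlen]; exact h2, (PySem.Chars.startswith_iff cs u.1.toList).2 hpre⟩
        rw [if_pos hc] at hle hcase hmax ⊢
        have : u.1.toList.length ≤ _ := hle
        omega
      · by_cases hL' : (if acc < t.1.toList.length ∧ ((t.1.toList.length : Int)) ≤ wm ∧ PySem.Chars.startswith cs t.1.toList then t.1.toList.length else acc) < L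
        · exact hmax L hL' h2 ⟨u, hu', hlen, hpre⟩
        · omega

theorem bestLen_spec (dict_load : List (String × Int × String)) (cs : List Char) (wm : Int) :
    (bestLen dict_load cs wm = 0 ∨ (HitAt dict_load cs (bestLen dict_load cs wm) ∧ 1 ≤ bestLen dict_load cs wm ∧ (bestLen dict_load cs wm : Int) ≤ wm))
    ∧ (∀ (L : Nat), 1 ≤ L → (L : Int) ≤ wm → HitAt dict_load cs L → L ≤ bestLen dict_load cs wm) := by
  unfold bestLen
  obtain ⟨hle, hcase, hmax⟩ := foldl_best_spec cs wm dict_load 0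
  refine ⟨?_, fun L h1 h2 hL => hmax L (by omega) h2 hL⟩
  rcases hcase with h | ⟨hh, hlt, hw⟩
  · exact Or.inl h
  · exact Or.inr ⟨hh, hlt, by exact_mod_cast hw⟩

theorem hitAt_le_length (dict_load : List (String × Int × String)) (cs : List Char) (L : Nat)
    (h : HitAt dict_load cs L) : L ≤ cs.length := by
  obtain ⟨t, _, hlen, hpre⟩ := h
  have := hpre.length_le
  omega

theorem dropLast_take_succ (l : List Char) (n : Nat) (h : n + 1 ≤ l.length) :
    (l.take (n + 1)).dropLast = l.take n := by
  rw [List.dropLast_eq_take, List.take_take, List.length_take]; congr 1; omega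

-- the two searches find the same length
theorem bestLen_eq_maxHit (dict_load : List (String × Int × String)) (cs : List Char) (wm : Int)
    (hwm : 1 ≤ wm) :
    bestLen dict_load cs wm = maxHit (PySem.Dict.mk dict_load) cs (min wm.toNat cs.length) := by
  obtain ⟨bcase, bmax⟩ := bestLen_spec dict_load cs wm
  obtain ⟨hcase, hmax⟩ := maxHit_spec (PySem.Dict.mk dict_load) cs (min wm.toNat cs.length)
  have hle := maxHit_le (PySem.Dict.mk dict_load) cs (min wm.toNat cs.length)
  have hab : bestLen dict_load cs wm ≤ maxHit (PySem.Dict.mk dict_load) cs (min wm.toNat cs.length) := by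
    rcases bcase with h | ⟨hh, h1, hw⟩
    · omega
    · have hacs : bestLen dict_load cs wm ≤ cs.length := hitAt_le_length _ _ _ hh
      exact hmax _ h1 (by omega) ((hit_iff dict_load cs _ h1 hacs).2 hh)
  have hba : maxHit (PySem.Dict.mk dict_load) cs (min wm.toNat cs.length) ≤ bestLen dict_load cs wm := by
    rcases hcase with h | ⟨hs, h1⟩
    · omega
    · have hbcs : maxHit (PySem.Dict.mk dict_load) cs (min wm.toNat cs.length) ≤ cs.length := by omega
      exact bmax _ h1 (by omega) ((hit_iff dict_load cs _ h1 hbcs).1 hs)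
  omega

-- the inner A loop on the prefix of length m returns the longest hit, else the single-char fallback
theorem mmsegInner_char (d : PySem.Dict String (Int × String)) (cs : List Char) (m : Nat)
    (h1 : 1 ≤ m) (h2 : m ≤ cs.length) :
    mmsegInner d (cs.take m) =
      if maxHit d cs m = 0 then some ((String.ofList (cs.take 1), 0, "wz"), 1)
      else some ((String.ofList (cs.take (maxHit d cs m)),
                  ((PySem.Dict.get? d (String.ofList (cs.take (maxHit d cs m)))).getD (0, "wz")).1,
                  ((PySem.Dict.get? d (String.ofList (cs.take (maxHit d cs m)))).getD (0, "wz")).2),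
                 maxHit d cs m) := by
  induction m with
  | zero => omega
  | succ m ih =>
    obtain ⟨c, tl, hct⟩ : ∃ c tl, cs.take (m + 1) = c :: tl := by
      cases h : cs.take (m + 1) with
      | nil =>
        exfalso
        have := congrArg List.length h
        rw [List.length_take_of_le h2] at this
        simp at this
      | cons c tl => exact ⟨c, tl, rfl⟩
    rw [hct, mmsegInner, ← hct, maxHit]
    cases hget : PySem.Dict.get? d (String.ofList (cs.take (m + 1))) with
    | some p =>
      obtain ⟨x, y⟩ := p
      simp [hget, List.length_take_of_le h2]
    | none =>
      simp only [Option.isSome_none, Bool.false_eq_true, if_false]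
      by_cases hm0 : m = 0
      · subst hm0
        rw [if_pos (by rw [List.length_take_of_le h2] : (cs.take (0 + 1)).length = 1)]
        rw [if_pos (by rw [maxHit] : maxHit d cs 0 = 0)]
      · rw [if_neg (by rw [List.length_take_of_le h2]; omega : ¬ (cs.take (m + 1)).length = 1)]
        rw [dropLast_take_succ cs m h2]
        exact ih (by omega) (by omega)

theorem loops_eq (dict_load : List (String × Int × String)) (wm : Int) (hwm : 1 ≤ wm) :
    ∀ (fuel : Nat) (cs : List Char),
      mmsegLoop (PySem.Dict.mk dict_load) wm fuel cs = mmsegAltLoop dict_load wm fuel cs := by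
  intro fuel
  induction fuel with
  | zero => intro cs; cases cs <;> rfl
  | succ fuel ih =>
    intro cs
    cases cs with
    | nil => rfl
    | cons c tl =>
      have hm1 : 1 ≤ min wm.toNat (c :: tl).length := by simp; omega
      have hm2 : min wm.toNat (c :: tl).length ≤ (c :: tl).length := min_le_right _ _
      have hslice : PySem.List.slice (c :: tl) none (some wm) = (c :: tl).take (min wm.toNat (c :: tl).length) := by
        rw [PySem.List.slice_to _ (by omega), List.take_eq_take_min]
      have hb := bestLen_eq_maxHit dict_load (c :: tl) wm hwm
      rw [mmsegLoop, mmsegAltLoop, hslice,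
          mmsegInner_char (PySem.Dict.mk dict_load) (c :: tl) _ hm1 hm2, ← hb]
      by_cases h0 : bestLen dict_load (c :: tl) wm = 0
      · rw [if_pos h0, if_pos h0]
        simp [ih]
      · rw [if_neg h0, if_neg h0]
        have hs : (PySem.Dict.get? (PySem.Dict.mk dict_load)
            (String.ofList ((c :: tl).take (bestLen dict_load (c :: tl) wm)))).isSome = true := by
          rcases (maxHit_spec (PySem.Dict.mk dict_load) (c :: tl) (min wm.toNat (c :: tl).length)).1 with h | ⟨hs', _⟩
          · rw [← hb] at h; exact absurd h h0
          · rw [← hb] at hs'; exact hs'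
        obtain ⟨p, hp⟩ := Option.isSome_iff_exists.mp hs
        obtain ⟨x, y⟩ := p
        simp [hp, ih]

-- ===== VERDICT (by name: the statement is the Claim_ definition above) =====
theorem mmseg_spec : Claim_equal_mmseg := by
  intro sen dict wm _ hpre
  unfold Spec_mmseg mmseg mmseg_alt
  rcases hpre with hwm | hempty
  · exact loops_eq dict wm hwm _ _
  · subst hempty; rfl
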